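-- pv_equiv track=rewrite | github.com/pawlowiczf/WDI-2023 | WDI zestaw 4/19_skoczek_szachownica.py | skoczek
-- ===== SOURCE A (Python) =====
-- def skoczek(tab, k):
--     n = len(tab)
--     counter = 0
--
--     for y in range(n):
--         for x in range(n):
--             if ( y + 1 < n ) and ( x + 2 < n ):
--                 iloczyn = tab[y][x] * tab[y+1][x+2]
--                 if iloczyn == k: counter += 1
--
--             if ( y + 2 < n ) and ( x + 1 < n ):
--                 iloczyn = tab[y][x] * tab[y + 2][x + 1]
--                 if iloczyn == k: counter += 1
--
--             if ( y + 1 < n ) and ( x - 2 >= 0 ):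
--                 iloczyn = tab[y][x] * tab[y + 1][x - 2]
--                 if iloczyn == k: counter += 1
--
--             if ( y + 2 < n ) and ( x - 1 >= 0 ):
--                 iloczyn = tab[y][x] * tab[y + 2][x - 1]
--                 if iloczyn == k: counter += 1
--
--         #end for 2
--     #end for 1
--
--     return counter
-- ===== SOURCE B (Python) =====
-- MOVES = ((1, 2), (2, 1), (1, -2), (2, -1), (-1, 2), (-2, 1), (-1, -2), (-2, -1))
--
-- def skoczek(tab, k):
--     n = len(tab)
--     counter = 0
--     for y in range(n):
--         for x in range(n):
--             for dy, dx in MOVES: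
--                 ny, nx = y + dy, x + dx
--                 if 0 <= ny < n and 0 <= nx < n and tab[y][x] * tab[ny][nx] == k:
--                     counter += 1
--     return counter // 2
-- ===== Notes on version B (the rewrite author's own statement) =====
-- stated objective: simpler
-- what changed: B replaces A's four hand-picked forward-direction if-blocks by a single loop over a table of all 8 knight offsets with one uniform bounds check, counting every directed knight edge once and halving at the end (each unordered pair is seen from both endpoints).
import Mathlib
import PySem

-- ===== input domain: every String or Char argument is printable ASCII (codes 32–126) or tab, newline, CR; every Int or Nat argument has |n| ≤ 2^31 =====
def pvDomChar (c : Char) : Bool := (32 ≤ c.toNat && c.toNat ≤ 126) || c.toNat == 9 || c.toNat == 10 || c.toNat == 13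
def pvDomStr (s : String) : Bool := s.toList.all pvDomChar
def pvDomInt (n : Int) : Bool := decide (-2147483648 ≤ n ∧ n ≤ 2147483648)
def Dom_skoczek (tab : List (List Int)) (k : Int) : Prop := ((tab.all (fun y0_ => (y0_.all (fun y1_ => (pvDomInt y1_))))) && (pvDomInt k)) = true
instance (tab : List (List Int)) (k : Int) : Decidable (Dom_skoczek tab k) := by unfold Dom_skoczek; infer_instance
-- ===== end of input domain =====

-- B replaces A's four hand-picked forward-direction branches by one loop over a table of all
-- 8 knight offsets with a uniform bounds check, counting directed edges and halving (simpler).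


-- shared cell accessor: tab[y][x]; the default 0 is never reached under Pre_skoczek
def cellAt (tab : List (List Int)) (y x : Int) : Int :=
  PySem.List.pyGetD (PySem.List.pyGetD tab y []) x 0

-- ===== PORT A =====
def skoczek (tab : List (List Int)) (k : Int) : Int :=
  (PySem.List.pyRange 0 (tab.length : Int) 1).foldl (fun counter y =>
    (PySem.List.pyRange 0 (tab.length : Int) 1).foldl (fun counter x =>
      let c1 := if y + 1 < (tab.length : Int) ∧ x + 2 < (tab.length : Int) then
          (if cellAt tab y x * cellAt tab (y+1) (x+2) = k then counter + 1 else counter)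
        else counter
      let c2 := if y + 2 < (tab.length : Int) ∧ x + 1 < (tab.length : Int) then
          (if cellAt tab y x * cellAt tab (y+2) (x+1) = k then c1 + 1 else c1)
        else c1
      let c3 := if y + 1 < (tab.length : Int) ∧ x - 2 ≥ 0 then
          (if cellAt tab y x * cellAt tab (y+1) (x-2) = k then c2 + 1 else c2)
        else c2
      let c4 := if y + 2 < (tab.length : Int) ∧ x - 1 ≥ 0 then
          (if cellAt tab y x * cellAt tab (y+2) (x-1) = k then c3 + 1 else c3)
        else c3
      c4) counter) 0

-- ===== PORT B =====
def knightMoves : List (Int × Int) :=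
  [(1, 2), (2, 1), (1, -2), (2, -1), (-1, 2), (-2, 1), (-1, -2), (-2, -1)]

def skoczek_alt (tab : List (List Int)) (k : Int) : Int :=
  let counter := (PySem.List.pyRange 0 (tab.length : Int) 1).foldl (fun counter y =>
    (PySem.List.pyRange 0 (tab.length : Int) 1).foldl (fun counter x =>
      knightMoves.foldl (fun counter m =>
        if 0 ≤ y + m.1 ∧ y + m.1 < (tab.length : Int) ∧ 0 ≤ x + m.2 ∧ x + m.2 < (tab.length : Int) ∧
            cellAt tab y x * cellAt tab (y + m.1) (x + m.2) = k then
          counter + 1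
        else counter) counter) counter) 0
  PySem.Int.floordiv counter 2

-- ===== PRECONDITION & SPEC =====
-- Pre_ excludes exactly the inputs where the Python A raises IndexError:
-- boards with ≥ 3 rows in which some row is shorter than the number of rows.
def Pre_skoczek (tab : List (List Int)) (k : Int) : Prop :=
  tab.length ≤ 2 ∨ ∀ row ∈ tab, tab.length ≤ row.length
instance (tab : List (List Int)) (k : Int) : Decidable (Pre_skoczek tab k) := by
  unfold Pre_skoczek; infer_instance
def pvWitness_skoczek : List (List Int) × Int := ([[1, 2, 3], [4, 5, 6], [7, 8, 9]], 6)

def Spec_skoczek (tab : List (List Int)) (k : Int) (out : Int) : Prop := out = skoczek_alt tab k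
instance (tab : List (List Int)) (k : Int) (out : Int) : Decidable (Spec_skoczek tab k out) := by unfold Spec_skoczek; infer_instance

-- ===== CLAIM (what is proved, stated in full; the proofs are below) =====
def Claim_equal_skoczek : Prop := ∀ (tab : List (List Int)) (k : Int), Dom_skoczek tab k → Pre_skoczek tab k → Spec_skoczek tab k (skoczek tab k)

-- ===== LEMMAS AND PROOFS =====

-- indicator of a directed knight edge from (y,x) in direction d, valued in Int
def edgeInd (tab : List (List Int)) (k : Int) (n : Int) (y x : Int) (d : Int × Int) : Int :=
  if 0 ≤ y + d.1 ∧ y + d.1 < n ∧ 0 ≤ x + d.2 ∧ x + d.2 < n ∧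
      cellAt tab y x * cellAt tab (y + d.1) (x + d.2) = k then 1 else 0

noncomputable def dirSum (tab : List (List Int)) (k : Int) (n : Int) (d : Int × Int) : Int :=
  ∑ p ∈ Finset.Ico (0 : Int) n ×ˢ Finset.Ico (0 : Int) n, edgeInd tab k n p.1 p.2 d

theorem pyRange_toFinset (n : Int) :
    (PySem.List.pyRange 0 n 1).toFinset = Finset.Ico (0 : Int) n := by
  ext x
  simp [PySem.List.mem_pyRange_one]

theorem foldl_sum_pyRange (n : Int) (g : Int → Int) (a : Int) :
    (PySem.List.pyRange 0 n 1).foldl (fun acc x => acc + g x) a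
      = a + ∑ x ∈ Finset.Ico (0 : Int) n, g x := by
  rw [PySem.List.foldl_add]
  congr 1
  rw [← List.sum_toFinset g (PySem.List.nodup_pyRange_one 0 n), pyRange_toFinset]

theorem dirSum_double (tab : List (List Int)) (k : Int) (n : Int) (d : Int × Int) :
    dirSum tab k n d
      = ∑ y ∈ Finset.Ico (0 : Int) n, ∑ x ∈ Finset.Ico (0 : Int) n, edgeInd tab k n y x d := by
  unfold dirSum
  rw [Finset.sum_product]

theorem dirSum_eq_card (tab : List (List Int)) (k : Int) (n : Int) (d : Int × Int) :
    dirSum tab k n d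
      = (((Finset.Ico (0 : Int) n ×ˢ Finset.Ico (0 : Int) n).filter
          (fun p => 0 ≤ p.1 + d.1 ∧ p.1 + d.1 < n ∧ 0 ≤ p.2 + d.2 ∧
            p.2 + d.2 < n ∧ cellAt tab p.1 p.2 * cellAt tab (p.1 + d.1) (p.2 + d.2) = k)).card : Int) := by
  unfold dirSum edgeInd
  rw [Finset.sum_boole]

theorem dirSum_reverse (tab : List (List Int)) (k : Int) (n : Int) (a b : Int) :
    dirSum tab k n (a, b) = dirSum tab k n (-a, -b) := by
  set d : Int × Int := (a, b) with hd
  have hd2 : ((-a : Int), (-b : Int)) = (-d.1, -d.2) := by rw [hd]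
  rw [hd2, dirSum_eq_card, dirSum_eq_card]
  congr 1
  apply Finset.card_bij (fun p _ => (p.1 + d.1, p.2 + d.2))
  · rintro ⟨y, x⟩ hp
    simp only [Finset.mem_filter, Finset.mem_product, Finset.mem_Ico] at hp ⊢
    obtain ⟨⟨⟨hy0, hyn⟩, hx0, hxn⟩, h1, h2, h3, h4, h5⟩ := hp
    have e1 : y + d.1 + -d.1 = y := by ring
    have e2 : x + d.2 + -d.2 = x := by ring
    refine ⟨⟨⟨h1, h2⟩, h3, h4⟩, by omega, by omega, by omega, by omega, ?_⟩
    rw [e1, e2, mul_comm]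
    exact h5
  · intro p hp q hq h
    simp only [Prod.mk.injEq] at h
    exact Prod.ext (by omega) (by omega)
  · rintro ⟨y, x⟩ hp
    simp only [Finset.mem_filter, Finset.mem_product, Finset.mem_Ico] at hp
    obtain ⟨⟨⟨hy0, hyn⟩, hx0, hxn⟩, h1, h2, h3, h4, h5⟩ := hp
    refine ⟨(y + -d.1, x + -d.2), ?_, ?_⟩
    · simp only [Finset.mem_filter, Finset.mem_product, Finset.mem_Ico]
      have e1 : y + -d.1 + d.1 = y := by ring
      have e2 : x + -d.2 + d.2 = x := by ring
      refine ⟨⟨⟨h1, h2⟩, h3, h4⟩, by omega, by omega, by omega, by omega, ?_⟩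
      rw [e1, e2, mul_comm]
      exact h5
    · simp only [Prod.mk.injEq]
      constructor <;> ring

theorem ifStep (a : Int) (c p : Prop) [Decidable c] [Decidable p] :
    (if c then (if p then a + 1 else a) else a)
      = a + (if c then (if p then (1 : Int) else 0) else 0) := by
  split_ifs <;> ring

theorem edge12 (tab : List (List Int)) (k n y x : Int) (hy : 0 ≤ y) (hx : 0 ≤ x) :
    edgeInd tab k n y x (1, 2)
      = if y + 1 < n ∧ x + 2 < n then
          (if cellAt tab y x * cellAt tab (y + 1) (x + 2) = k then (1 : Int) else 0) else 0 := by
  unfold edgeInd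
  rw [← ite_and]
  refine if_congr ?_ rfl rfl
  constructor
  · rintro ⟨_, h2, _, h4, h5⟩; exact ⟨⟨h2, h4⟩, h5⟩
  · rintro ⟨⟨h2, h4⟩, h5⟩; exact ⟨by omega, h2, by omega, h4, h5⟩

theorem edge21 (tab : List (List Int)) (k n y x : Int) (hy : 0 ≤ y) (hx : 0 ≤ x) :
    edgeInd tab k n y x (2, 1)
      = if y + 2 < n ∧ x + 1 < n then
          (if cellAt tab y x * cellAt tab (y + 2) (x + 1) = k then (1 : Int) else 0) else 0 := by
  unfold edgeInd
  rw [← ite_and]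
  refine if_congr ?_ rfl rfl
  constructor
  · rintro ⟨_, h2, _, h4, h5⟩; exact ⟨⟨h2, h4⟩, h5⟩
  · rintro ⟨⟨h2, h4⟩, h5⟩; exact ⟨by omega, h2, by omega, h4, h5⟩

theorem edge1m2 (tab : List (List Int)) (k n y x : Int) (hy : 0 ≤ y) (hxn : x < n) :
    edgeInd tab k n y x (1, -2)
      = if y + 1 < n ∧ x - 2 ≥ 0 then
          (if cellAt tab y x * cellAt tab (y + 1) (x - 2) = k then (1 : Int) else 0) else 0 := by
  unfold edgeInd
  have e : x + (-2 : Int) = x - 2 := by ring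
  rw [e, ← ite_and]
  refine if_congr ?_ rfl rfl
  constructor
  · rintro ⟨_, h2, h3, _, h5⟩; exact ⟨⟨h2, h3⟩, h5⟩
  · rintro ⟨⟨h2, h3⟩, h5⟩; exact ⟨by omega, h2, h3, by omega, h5⟩

theorem edge2m1 (tab : List (List Int)) (k n y x : Int) (hy : 0 ≤ y) (hxn : x < n) :
    edgeInd tab k n y x (2, -1)
      = if y + 2 < n ∧ x - 1 ≥ 0 then
          (if cellAt tab y x * cellAt tab (y + 2) (x - 1) = k then (1 : Int) else 0) else 0 := by
  unfold edgeInd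
  have e : x + (-1 : Int) = x - 1 := by ring
  rw [e, ← ite_and]
  refine if_congr ?_ rfl rfl
  constructor
  · rintro ⟨_, h2, h3, _, h5⟩; exact ⟨⟨h2, h3⟩, h5⟩
  · rintro ⟨⟨h2, h3⟩, h5⟩; exact ⟨by omega, h2, h3, by omega, h5⟩

theorem skoczek_eq_dirSums (tab : List (List Int)) (k : Int) :
    skoczek tab k
      = dirSum tab k (tab.length : Int) (1, 2) + dirSum tab k (tab.length : Int) (2, 1)
        + dirSum tab k (tab.length : Int) (1, -2) + dirSum tab k (tab.length : Int) (2, -1) := by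
  unfold skoczek
  rw [PySem.List.foldl_congr_mem (g := fun counter y => counter +
      ∑ x ∈ Finset.Ico (0 : Int) (tab.length : Int),
        (edgeInd tab k (tab.length : Int) y x (1, 2) + edgeInd tab k (tab.length : Int) y x (2, 1)
          + edgeInd tab k (tab.length : Int) y x (1, -2)
          + edgeInd tab k (tab.length : Int) y x (2, -1)))]
  · rw [foldl_sum_pyRange, dirSum_double, dirSum_double, dirSum_double, dirSum_double]
    simp only [Finset.sum_add_distrib]
    ring
  · intro acc y hy
    rw [PySem.List.mem_pyRange_one] at hy
    rw [PySem.List.foldl_congr_mem (g := fun acc x => acc +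
        (edgeInd tab k (tab.length : Int) y x (1, 2) + edgeInd tab k (tab.length : Int) y x (2, 1)
          + edgeInd tab k (tab.length : Int) y x (1, -2)
          + edgeInd tab k (tab.length : Int) y x (2, -1)))]
    · rw [foldl_sum_pyRange]
    · intro acc2 x hx
      rw [PySem.List.mem_pyRange_one] at hx
      simp only []
      rw [ifStep, ifStep, ifStep, ifStep,
        edge12 tab k _ y x (by omega) (by omega), edge21 tab k _ y x (by omega) (by omega),
        edge1m2 tab k _ y x (by omega) (by omega), edge2m1 tab k _ y x (by omega) (by omega)]
      ring

theorem skoczek_alt_eq (tab : List (List Int)) (k : Int) :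
    skoczek_alt tab k
      = PySem.Int.floordiv
          (∑ y ∈ Finset.Ico (0 : Int) (tab.length : Int),
            ∑ x ∈ Finset.Ico (0 : Int) (tab.length : Int),
              (knightMoves.map (edgeInd tab k (tab.length : Int) y x)).sum) 2 := by
  unfold skoczek_alt
  simp only []
  congr 1
  rw [PySem.List.foldl_congr_mem (g := fun counter y => counter +
      ∑ x ∈ Finset.Ico (0 : Int) (tab.length : Int),
        (knightMoves.map (edgeInd tab k (tab.length : Int) y x)).sum)]
  · rw [foldl_sum_pyRange, zero_add]
  · intro acc y hy
    rw [PySem.List.foldl_congr_mem (g := fun acc x => acc +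
        (knightMoves.map (edgeInd tab k (tab.length : Int) y x)).sum)]
    · rw [foldl_sum_pyRange]
    · intro acc2 x hx
      rw [PySem.List.foldl_congr_mem (g := fun acc m => acc +
          edgeInd tab k (tab.length : Int) y x m), PySem.List.foldl_add]
      intro acc3 m hm
      simp only [edgeInd]
      split_ifs <;> ring

-- ===== VERDICT (by name: the statement is the Claim_ definition above) =====
theorem skoczek_spec : Claim_equal_skoczek := by
  intro tab k _ _
  unfold Spec_skoczek
  rw [skoczek_alt_eq]
  have hsum : ∀ y x : Int,
      (knightMoves.map (edgeInd tab k (tab.length : Int) y x)).sum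
        = (edgeInd tab k (tab.length : Int) y x (1, 2) + edgeInd tab k (tab.length : Int) y x (2, 1)
            + edgeInd tab k (tab.length : Int) y x (1, -2)
            + edgeInd tab k (tab.length : Int) y x (2, -1))
          + (edgeInd tab k (tab.length : Int) y x (-1, -2)
            + edgeInd tab k (tab.length : Int) y x (-2, -1)
            + edgeInd tab k (tab.length : Int) y x (-1, 2)
            + edgeInd tab k (tab.length : Int) y x (-2, 1)) := by
    intro y x
    simp only [knightMoves, List.map, List.sum_cons, List.sum_nil]
    ring
  rw [Finset.sum_congr rfl (fun y _ => Finset.sum_congr rfl (fun x _ => hsum y x))]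
  simp only [Finset.sum_add_distrib]
  rw [← dirSum_double, ← dirSum_double, ← dirSum_double, ← dirSum_double,
    ← dirSum_double, ← dirSum_double, ← dirSum_double, ← dirSum_double]
  rw [show ((-1 : Int), (2 : Int)) = (-(1 : Int), -(-2 : Int)) by norm_num,
    show ((-2 : Int), (1 : Int)) = (-(2 : Int), -(-1 : Int)) by norm_num,
    ← dirSum_reverse, ← dirSum_reverse, ← dirSum_reverse, ← dirSum_reverse]
  rw [← skoczek_eq_dirSums]
  rw [show skoczek tab k + skoczek tab k = 2 * skoczek tab k by ring]
  rw [PySem.Int.floordiv_eq_ediv_of_pos (by norm_num)]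
  exact (Int.mul_ediv_cancel_left _ (by norm_num)).symm
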